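-- pv_equiv track=rewrite | github.com/pytorch/FBGEMM | fbgemm_gpu/fbgemm_gpu/tbe/bench/utils.py | generate_batch_size_per_feature_per_rank
-- ===== SOURCE A (Python) =====
-- from typing import List, Tuple
--
-- def generate_batch_size_per_feature_per_rank(
--     Bs: List[int], num_ranks: int
-- ) -> List[List[int]]:
--     """
--     Generate batch size per feature per rank for VBE, assuming the batch size
--     is evenly distributed across ranks.
--     Args:
--         Bs (List[int]): batch size per feature
--         num_ranks (int): number of ranks
--     Returns:
--         List[List[int]]: batch size per feature per rank
--     """
--     b_per_feature_per_rank = []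
--     for B in Bs:
--         b_per_feature = []
--         for i in range(num_ranks):
--             if i != num_ranks - 1:
--                 b_per_feature.append(int(B / num_ranks))
--             else:
--                 b_per_feature.append(B - sum(b_per_feature))
--         b_per_feature_per_rank.append(b_per_feature)
--     return b_per_feature_per_rank
-- ===== SOURCE B (Python) =====
-- def generate_batch_size_per_feature_per_rank(Bs, num_ranks):
--     # Rank-major: build one column per rank, then transpose into per-feature rows.
--     if num_ranks <= 0:
--         return [[] for _ in Bs]
--     quot = [int(B / num_ranks) for B in Bs]
--     cols = [quot] * (num_ranks - 1)
--     cols.append([B - (num_ranks - 1) * q for B, q in zip(Bs, quot)])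
--     return [list(row) for row in zip(*cols)]
-- ===== Notes on version B (the rewrite author's own statement) =====
-- stated objective: alternative
-- what changed: Builds the answer rank-major instead of feature-major: one quotient column computed once, replicated for the first num_ranks-1 ranks, a remainder column zipped from Bs, and the columns transposed with zip(*cols) into per-feature rows, replacing A's nested per-feature/per-rank loop with its last-rank branch and sum() re-scan.
import Mathlib
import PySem

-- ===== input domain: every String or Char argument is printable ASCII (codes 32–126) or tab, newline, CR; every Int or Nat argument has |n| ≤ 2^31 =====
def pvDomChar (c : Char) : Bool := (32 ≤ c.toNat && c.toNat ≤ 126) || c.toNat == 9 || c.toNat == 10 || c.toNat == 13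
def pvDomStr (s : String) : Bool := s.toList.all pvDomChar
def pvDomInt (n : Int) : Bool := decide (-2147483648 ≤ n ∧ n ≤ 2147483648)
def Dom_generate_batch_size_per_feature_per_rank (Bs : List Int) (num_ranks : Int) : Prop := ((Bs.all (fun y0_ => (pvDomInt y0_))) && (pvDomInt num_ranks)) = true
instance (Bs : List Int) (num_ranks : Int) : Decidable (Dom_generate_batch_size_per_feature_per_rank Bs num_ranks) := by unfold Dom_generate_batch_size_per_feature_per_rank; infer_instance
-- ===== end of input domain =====

-- B builds the result rank-major (one column per rank, then a zip(*cols) transpose) instead of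
-- A's feature-major inner loop with its last-rank branch and sum() re-scan; return value only.

-- ===== PORT A =====
-- int(B / num_ranks) is float division truncated toward zero; on Dom (|B|,|num_ranks| ≤ 2^31)
-- the float quotient truncates exactly, so it is ported as Int.tdiv.
def generate_batch_size_per_feature_per_rank (Bs : List Int) (num_ranks : Int) : List (List Int) :=
  Bs.foldl (fun b_per_feature_per_rank B =>
    b_per_feature_per_rank ++
      [(PySem.List.pyRange 0 num_ranks 1).foldl
        (fun b_per_feature i =>
          if i ≠ num_ranks - 1 then
            b_per_feature ++ [Int.tdiv B num_ranks]
          else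
            b_per_feature ++ [B - b_per_feature.sum]) []]) []

-- ===== PORT B =====
def generate_batch_size_per_feature_per_rank_alt (Bs : List Int) (num_ranks : Int) : List (List Int) :=
  if num_ranks ≤ 0 then
    Bs.map (fun _ => ([] : List Int))
  else
    let quot := Bs.map (fun B => Int.tdiv B num_ranks)
    let cols := List.replicate (num_ranks - 1).toNat quot ++
      [List.zipWith (fun B q => B - (num_ranks - 1) * q) Bs quot]
    -- zip(*cols) transposes, truncating to the shortest column; ported by index over that
    -- length (every index read is in range, so getD's default is never used — exact).
    let m := ((cols.map List.length).min?).getD 0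
    (List.range m).map (fun k => cols.map (fun c => c.getD k 0))

-- ===== PRECONDITION & SPEC =====
def Spec_generate_batch_size_per_feature_per_rank (Bs : List Int) (num_ranks : Int) (out : List (List Int)) : Prop := out = generate_batch_size_per_feature_per_rank_alt Bs num_ranks
instance (Bs : List Int) (num_ranks : Int) (out : List (List Int)) : Decidable (Spec_generate_batch_size_per_feature_per_rank Bs num_ranks out) := by unfold Spec_generate_batch_size_per_feature_per_rank; infer_instance

-- ===== CLAIM (what is proved, stated in full; the proofs are below) =====
def Claim_equal_generate_batch_size_per_feature_per_rank : Prop := ∀ (Bs : List Int) (num_ranks : Int), Dom_generate_batch_size_per_feature_per_rank Bs num_ranks → Spec_generate_batch_size_per_feature_per_rank Bs num_ranks (generate_batch_size_per_feature_per_rank Bs num_ranks)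

-- ===== LEMMAS AND PROOFS =====

-- append-accumulating foldl is init ++ map
theorem pv_foldl_app {α β : Type} (f : α → β) :
    ∀ (l : List α) (init : List β),
      l.foldl (fun acc x => acc ++ [f x]) init = init ++ l.map f := by
  intro l
  induction l with
  | nil => simp [List.foldl]
  | cons x xs ih => intro init; simp [List.foldl, ih]

-- the first m steps of A's inner loop (all i < n-1) just append q each time
theorem pv_prefix (B n q : Int) :
    ∀ (m : Nat) (row : List Int), (m : Int) ≤ n - 1 →
      (PySem.List.pyRange 0 m 1).foldl
        (fun b_per_feature i =>
          if i ≠ n - 1 then b_per_feature ++ [q] else b_per_feature ++ [B - b_per_feature.sum]) row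
      = row ++ List.replicate m q := by
  intro m
  induction m with
  | zero =>
      intro row _
      rw [show ((0 : Nat) : Int) = 0 by norm_num, PySem.List.pyRange_one_eq_nil (by omega)]
      simp [List.foldl]
  | succ m ih =>
      intro row hm
      have hc : ((m + 1 : Nat) : Int) = (m : Int) + 1 := by push_cast; ring
      rw [hc, PySem.List.pyRange_one_succ_right (by positivity), List.foldl_append]
      rw [ih row (by push_cast at hm ⊢; omega)]
      have hne : (m : Int) ≠ n - 1 := by push_cast at hm; omega
      simp [List.foldl, hne, List.replicate_succ']

-- A's inner loop for n ≥ 1 produces the closed-form row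
theorem pv_row (B n : Int) (hn : 1 ≤ n) :
    (PySem.List.pyRange 0 n 1).foldl
      (fun b_per_feature i =>
        if i ≠ n - 1 then b_per_feature ++ [Int.tdiv B n] else b_per_feature ++ [B - b_per_feature.sum]) []
    = List.replicate (n - 1).toNat (Int.tdiv B n) ++ [B - (n - 1) * Int.tdiv B n] := by
  have hsplit : PySem.List.pyRange 0 n 1
      = PySem.List.pyRange 0 (n - 1) 1 ++ PySem.List.pyRange (n - 1) n 1 :=
    PySem.List.pyRange_one_append 0 (n - 1) n (by omega) (by omega)
  have hlast : PySem.List.pyRange (n - 1) n 1 = [n - 1] := by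
    have := PySem.List.pyRange_one_singleton (n - 1)
    rw [show n - 1 + 1 = n by ring] at this
    exact this
  have hcast : ((n - 1).toNat : Int) = n - 1 := Int.toNat_of_nonneg (by omega)
  rw [hsplit, hlast, List.foldl_append]
  rw [show PySem.List.pyRange 0 (n - 1) 1 = PySem.List.pyRange 0 ((n - 1).toNat : Int) 1 by rw [hcast]]
  rw [pv_prefix B n (Int.tdiv B n) (n - 1).toNat [] (by omega)]
  simp only [List.foldl_cons, List.foldl_nil, ne_eq, not_true_eq_false, if_false,
    List.nil_append, List.sum_replicate, nsmul_eq_mul, hcast]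

-- min? of a nonempty constant list
theorem pv_min_replicate_succ (k x : Nat) : (List.replicate (k + 1) x).min? = some x := by
  induction k with
  | zero => simp
  | succ k ih => rw [List.replicate_succ, List.min?_cons]; simp_all

-- ===== VERDICT (by name: the statement is the Claim_ definition above) =====
theorem generate_batch_size_per_feature_per_rank_spec : Claim_equal_generate_batch_size_per_feature_per_rank := by
  intro Bs n _
  unfold Spec_generate_batch_size_per_feature_per_rank
  unfold generate_batch_size_per_feature_per_rank generate_batch_size_per_feature_per_rank_alt
  by_cases h : n ≤ 0
  · simp only [if_pos h]
    rw [pv_foldl_app]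
    have hnil : PySem.List.pyRange 0 n 1 = [] := PySem.List.pyRange_one_eq_nil (by omega)
    simp [hnil]
  · simp only [if_neg h]
    rw [pv_foldl_app]
    simp only [List.nil_append]
    have hq : (Bs.map (fun B => Int.tdiv B n)).length = Bs.length := by simp
    have hz : (List.zipWith (fun B q => B - (n - 1) * q) Bs (Bs.map (fun B => Int.tdiv B n))).length
        = Bs.length := by simp
    have hcols : ((List.replicate (n - 1).toNat (Bs.map (fun B => Int.tdiv B n)) ++
        [List.zipWith (fun B q => B - (n - 1) * q) Bs (Bs.map (fun B => Int.tdiv B n))]).map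
        List.length) = List.replicate ((n - 1).toNat + 1) Bs.length := by
      simp [List.replicate_succ', hq, hz]
    rw [hcols, pv_min_replicate_succ]
    simp only [Option.getD_some]
    apply List.ext_getElem
    · simp
    · intro k hk1 hk2
      simp only [List.length_map] at hk1
      simp only [List.getElem_map, List.getElem_range]
      rw [pv_row _ n (by omega)]
      simp only [List.map_append, List.map_replicate,
        List.map_cons, List.map_nil]
      congr 1
      · congr 1
        rw [List.getD_eq_getElem _ _ (by omega)]
        simp
      · congr 1
        rw [List.getD_eq_getElem _ _ (by omega)]
        simp
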